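-- pv_equiv track=rewrite | github.com/zzz5y/daily_stock_analysis | src/services/name_to_code_resolver.py | _build_reverse_map_no_duplicates
-- ===== SOURCE A (Python) =====
-- from typing import Dict, Optional, Set
--
-- def _build_reverse_map_no_duplicates(
--     code_to_name: Dict[str, str],
-- ) -> Dict[str, str]:
--     """
--     Build name -> code map. If a name maps to multiple codes (ambiguous), exclude it.
--     """
--     name_to_codes: Dict[str, Set[str]] = {}
--     for code, name in code_to_name.items():
--         if not name or not code:
--             continue
--         name = name.strip()
--         if name not in name_to_codes:
--             name_to_codes[name] = set()
--         name_to_codes[name].add(code)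
--     # Only include names with exactly one code
--     return {name: next(iter(codes)) for name, codes in name_to_codes.items() if len(codes) == 1}
-- ===== SOURCE B (Python) =====
-- def _build_reverse_map_no_duplicates(code_to_name):
--     """Single pass: keep a name->code result and a set of ambiguous names;
--     on a second code for a name, pop it from the result and mark it ambiguous."""
--     result = {}
--     ambiguous = set()
--     for code, name in code_to_name.items():
--         if not name or not code:
--             continue
--         name = name.strip()
--         if name in ambiguous:
--             continue
--         if name in result:
--             del result[name]
--             ambiguous.add(name)
--         else:
--             result[name] = code
--     return result
-- ===== Notes on version B (the rewrite author's own statement) =====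
-- stated objective: alternative
-- what changed: Replaces A's two-phase group-then-filter (build name->set-of-codes, then a comprehension keeping singleton sets) by a single pass that maintains the final name->code dict directly, popping a name on its second code and remembering it in an ambiguous set so it is never re-added.
import Mathlib
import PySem

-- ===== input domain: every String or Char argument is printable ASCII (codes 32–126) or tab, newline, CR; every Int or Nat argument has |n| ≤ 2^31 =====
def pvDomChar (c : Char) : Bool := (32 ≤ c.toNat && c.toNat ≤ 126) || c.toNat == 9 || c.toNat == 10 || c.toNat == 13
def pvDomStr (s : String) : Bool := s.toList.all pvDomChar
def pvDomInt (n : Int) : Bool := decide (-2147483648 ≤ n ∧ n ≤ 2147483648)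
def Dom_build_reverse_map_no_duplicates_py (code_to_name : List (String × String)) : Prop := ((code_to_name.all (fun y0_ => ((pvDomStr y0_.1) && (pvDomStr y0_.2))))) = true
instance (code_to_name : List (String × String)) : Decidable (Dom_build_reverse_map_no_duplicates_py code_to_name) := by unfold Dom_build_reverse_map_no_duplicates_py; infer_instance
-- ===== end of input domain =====

-- B replaces A's group-by-name-then-filter-singletons with a single pass maintaining the
-- result dict and an ambiguous-name set directly (alternative decomposition, same cost).


-- ===== PORT A =====
-- loop body of A: group codes by (stripped) name into name -> set-of-codes
def stepA (m : PySem.Dict String (PySem.Set String)) (p : String × String) :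
    PySem.Dict String (PySem.Set String) :=
  if p.2 == "" || p.1 == "" then m
  else
    let nm := PySem.Str.strip p.2
    let m1 := if m.contains nm then m else m.insert nm PySem.Set.empty
    m1.insert nm (PySem.Set.add (m1.getD nm PySem.Set.empty) p.1)

def build_reverse_map_no_duplicates_py (code_to_name : List (String × String)) : List (String × String) :=
  let m := (PySem.Dict.ofList code_to_name).items.foldl stepA PySem.Dict.empty
  -- {name: next(iter(codes)) for name, codes in name_to_codes.items() if len(codes) == 1}
  (m.items.filter (fun q => PySem.Set.len q.2 == 1)).map (fun q => (q.1, q.2.headD ""))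

-- ===== PORT B =====
-- loop body of B: maintain (result dict, ambiguous set); pop a name on its second code
def stepB (st : PySem.Dict String String × PySem.Set String) (p : String × String) :
    PySem.Dict String String × PySem.Set String :=
  if p.2 == "" || p.1 == "" then st
  else
    let nm := PySem.Str.strip p.2
    if PySem.Set.contains st.2 nm then st
    else if st.1.contains nm then (st.1.erase nm, PySem.Set.add st.2 nm)
    else (st.1.insert nm p.1, st.2)

def build_reverse_map_no_duplicates_py_alt (code_to_name : List (String × String)) : List (String × String) :=
  let st := (PySem.Dict.ofList code_to_name).items.foldl stepB (PySem.Dict.empty, PySem.Set.empty)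
  st.1.items

-- ===== PRECONDITION & SPEC =====
def Spec_build_reverse_map_no_duplicates_py (code_to_name : List (String × String)) (out : List (String × String)) : Prop := out = build_reverse_map_no_duplicates_py_alt code_to_name
instance (code_to_name : List (String × String)) (out : List (String × String)) : Decidable (Spec_build_reverse_map_no_duplicates_py code_to_name out) := by unfold Spec_build_reverse_map_no_duplicates_py; infer_instance

-- ===== CLAIM (what is proved, stated in full; the proofs are below) =====
def Claim_equal_build_reverse_map_no_duplicates_py : Prop := ∀ (code_to_name : List (String × String)), Dom_build_reverse_map_no_duplicates_py code_to_name → Spec_build_reverse_map_no_duplicates_py code_to_name (build_reverse_map_no_duplicates_py code_to_name)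

-- ===== LEMMAS AND PROOFS =====

-- the final comprehension of A, as a function of the items list
def pvFilt (L : List (String × PySem.Set String)) : List (String × String) :=
  (L.filter (fun q => PySem.Set.len q.2 == 1)).map (fun q => (q.1, q.2.headD ""))

lemma pvFilt_append_single (L : List (String × PySem.Set String)) (nm c : String) :
    pvFilt (L ++ [(nm, [c])]) = pvFilt L ++ [(nm, c)] := by
  simp [pvFilt, PySem.Set.len]

lemma pvFilt_cons (a : String × PySem.Set String) (L : List (String × PySem.Set String)) :
    pvFilt (a :: L) =
      (if PySem.Set.len a.2 == 1 then [(a.1, a.2.headD "")] else []) ++ pvFilt L := by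
  by_cases h : a.2.length = 1 <;> simp [pvFilt, PySem.Set.len, h]

lemma pvFilt_key_mem (L : List (String × PySem.Set String)) (q : String × String)
    (h : q ∈ pvFilt L) : q.1 ∈ L.map Prod.fst := by
  unfold pvFilt at h
  obtain ⟨p, hp, hq⟩ := List.mem_map.mp h
  have hpL : p ∈ L := (List.mem_filter.mp hp).1
  have : q.1 = p.1 := by rw [← hq]
  rw [this]
  exact List.mem_map.mpr ⟨p, hpL, rfl⟩

lemma map_replace_id (L : List (String × PySem.Set String)) (nm : String)
    (s' : PySem.Set String) (h : ∀ p ∈ L, p.1 ≠ nm) :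
    L.map (fun p => if p.1 == nm then (nm, s') else p) = L := by
  apply List.map_congr_left ?_ |>.trans L.map_id
  intro p hp
  simp [h p hp]

lemma filt_key_id (L : List (String × PySem.Set String)) (nm : String)
    (h : ∀ p ∈ L, p.1 ≠ nm) :
    (pvFilt L).filter (fun p => !p.1 == nm) = pvFilt L := by
  apply List.filter_eq_self.mpr
  intro q hq
  have := pvFilt_key_mem L q hq
  simp at this
  obtain ⟨b, hb⟩ := this
  simpa using h _ hb

lemma pvFilt_replace_drop (L : List (String × PySem.Set String)) (nm : String)
    (s s' : PySem.Set String)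
    (hmem : (nm, s) ∈ L) (hnd : (L.map Prod.fst).Nodup)
    (hs' : s'.length ≠ 1) :
    pvFilt (L.map (fun p => if p.1 == nm then (nm, s') else p)) =
      (pvFilt L).filter (fun p => !p.1 == nm) := by
  induction L with
  | nil => cases hmem
  | cons a L ih =>
    simp only [List.map] at hnd
    have hnd' : (L.map Prod.fst).Nodup := (List.nodup_cons.mp hnd).2
    have hna : a.1 ∉ L.map Prod.fst := (List.nodup_cons.mp hnd).1
    by_cases ha : a.1 = nm
    · -- head is the nm entry; tail has no nm
      have hLnm : ∀ p ∈ L, p.1 ≠ nm := by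
        intro p hp hpn
        exact hna (ha ▸ hpn ▸ List.mem_map.mpr ⟨p, hp, rfl⟩)
      have haeq : a = (nm, s) := by
        rcases List.mem_cons.mp hmem with h | h
        · exact h.symm
        · exact absurd rfl (hLnm _ h)
      rw [List.map_cons, map_replace_id L nm s' hLnm]
      rw [pvFilt_cons, pvFilt_cons]
      simp only [haeq, beq_self_eq_true, if_true]
      rw [List.filter_append]
      rw [filt_key_id L nm hLnm]
      simp [PySem.Set.len, hs']
    · rw [List.map_cons, pvFilt_cons]
      have hmem' : (nm, s) ∈ L := by
        rcases List.mem_cons.mp hmem with h | h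
        · exact absurd (congrArg Prod.fst h.symm) ha
        · exact h
      have hbeq : (a.1 == nm) = false := by simpa using ha
      simp only [hbeq, Bool.false_eq_true, if_false]
      rw [pvFilt_cons, List.filter_append, ih hmem' hnd']
      congr 1
      by_cases h1 : a.2.length = 1 <;> simp [PySem.Set.len, h1, hbeq]

lemma pvFilt_replace_keep (L : List (String × PySem.Set String)) (nm : String)
    (s s' : PySem.Set String)
    (hmem : (nm, s) ∈ L) (hnd : (L.map Prod.fst).Nodup)
    (hs : s.length ≠ 1) (hs' : s'.length ≠ 1) :
    pvFilt (L.map (fun p => if p.1 == nm then (nm, s') else p)) = pvFilt L := by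
  induction L with
  | nil => cases hmem
  | cons a L ih =>
    have hnd' : (L.map Prod.fst).Nodup := (List.nodup_cons.mp (by simpa using hnd)).2
    have hna : a.1 ∉ L.map Prod.fst := (List.nodup_cons.mp (by simpa using hnd)).1
    by_cases ha : a.1 = nm
    · have hLnm : ∀ p ∈ L, p.1 ≠ nm := by
        intro p hp hpn
        exact hna (ha ▸ hpn ▸ List.mem_map.mpr ⟨p, hp, rfl⟩)
      have haeq : a = (nm, s) := by
        rcases List.mem_cons.mp hmem with h | h
        · exact h.symm
        · exact absurd rfl (hLnm _ h)
      rw [List.map_cons, map_replace_id L nm s' hLnm]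
      rw [pvFilt_cons, pvFilt_cons]
      simp only [haeq, beq_self_eq_true, if_true]
      simp [PySem.Set.len, hs, hs']
    · have hmem' : (nm, s) ∈ L := by
        rcases List.mem_cons.mp hmem with h | h
        · exact absurd (congrArg Prod.fst h.symm) ha
        · exact h
      have hbeq : (a.1 == nm) = false := by simpa using ha
      rw [List.map_cons]
      simp only [hbeq, Bool.false_eq_true, if_false]
      rw [pvFilt_cons, pvFilt_cons, ih hmem' hnd']

lemma loop_inv (todo : List (String × String))
    (m : PySem.Dict String (PySem.Set String))
    (res : PySem.Dict String String) (amb : PySem.Set String)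
    (hm : m.keys.Nodup)
    (hres : res = PySem.Dict.mk (pvFilt m.items))
    (hamb : ∀ x : String, x ∈ amb ↔ 2 ≤ (m.getD x []).length)
    (hne : ∀ p ∈ m.items, (p.2 : List String) ≠ [])
    (hfresh : ∀ p ∈ todo, ∀ x : String, p.1 ∉ m.getD x ([] : PySem.Set String))
    (hnodup : (todo.map Prod.fst).Nodup) :
    (todo.foldl stepB (res, amb)).1 =
      PySem.Dict.mk (pvFilt (todo.foldl stepA m).items) := by
  induction todo generalizing m res amb with
  | nil => simpa using hres
  | cons p rest ih =>
    have hnodup' : (rest.map Prod.fst).Nodup := (List.nodup_cons.mp (by simpa using hnodup)).2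
    have hp1 : p.1 ∉ rest.map Prod.fst := (List.nodup_cons.mp (by simpa using hnodup)).1
    simp only [List.foldl_cons]
    by_cases hg : (p.2 == "" || p.1 == "") = true
    · rw [show stepA m p = m from by simp [stepA, hg],
          show stepB (res, amb) p = (res, amb) from by simp [stepB, hg]]
      exact ih m res amb hm hres hamb hne
        (fun q hq => hfresh q (List.mem_cons_of_mem _ hq)) hnodup'
    · have hkeys : (m.items.map Prod.fst).Nodup := hm
      by_cases hc : m.contains (PySem.Str.strip p.2) = true
      · -- name already present with set s
        obtain ⟨s, hs⟩ : ∃ s, m.get? (PySem.Str.strip p.2) = some s := by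
          have := PySem.Dict.contains_eq_isSome_get? m (PySem.Str.strip p.2)
          rw [hc] at this
          exact Option.isSome_iff_exists.mp this.symm
        have hgd : m.getD (PySem.Str.strip p.2) [] = s := PySem.Dict.getD_of_get?_eq_some _ _ hs
        have hsmem : (PySem.Str.strip p.2, s) ∈ m.items := PySem.Dict.mem_items_of_get?_eq_some m hs
        have hsne : s ≠ [] := hne _ hsmem
        have hfr : p.1 ∉ s := by
          have := hfresh p (List.mem_cons_self) (PySem.Str.strip p.2)
          rwa [show m.getD (PySem.Str.strip p.2) ([] : PySem.Set String) = s from hgd] at this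
        have hadd : PySem.Set.add s p.1 = s ++ [p.1] := by
          simp [PySem.Set.add]
          intro hcon
          exact absurd hcon hfr
        have hmA : stepA m p = m.insert (PySem.Str.strip p.2) (s ++ [p.1]) := by
          rw [stepA, if_neg hg]
          simp only [hc, if_true]
          rw [show m.getD (PySem.Str.strip p.2) PySem.Set.empty = s from
            PySem.Dict.getD_of_get?_eq_some _ _ hs, hadd]
        have hitems : (m.insert (PySem.Str.strip p.2) (s ++ [p.1])).items =
            m.items.map (fun q => if q.1 == PySem.Str.strip p.2
              then (PySem.Str.strip p.2, s ++ [p.1]) else q) :=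
          PySem.Dict.items_insert_of_contains m _ hc
        have hm' : (m.insert (PySem.Str.strip p.2) (s ++ [p.1])).keys.Nodup :=
          PySem.Dict.nodup_keys_insert m _ _ hm
        have hne' : ∀ q ∈ (m.insert (PySem.Str.strip p.2) (s ++ [p.1])).items,
            (q.2 : List String) ≠ [] := by
          intro q hq
          rcases (PySem.Dict.mem_items_insert m _ _ q).mp hq with h | ⟨h, _⟩
          · rw [h]; simp [hsne]
          · exact hne q h
        have hfresh' : ∀ q ∈ rest, ∀ x : String,
            q.1 ∉ (m.insert (PySem.Str.strip p.2) (s ++ [p.1])).getD x ([] : PySem.Set String) := by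
          intro q hq x
          rw [PySem.Dict.getD_insert]
          split
          · intro hx
            have hq1 : q.1 ∈ rest.map Prod.fst := List.mem_map.mpr ⟨q, hq, rfl⟩
            rcases List.mem_append.mp hx with h | h
            · exact hfresh q (List.mem_cons_of_mem _ hq) _ (hgd ▸ h)
            · simp at h
              exact hp1 (h ▸ hq1)
          · exact hfresh q (List.mem_cons_of_mem _ hq) x
        by_cases h1 : s.length = 1
        · -- was unique: B pops it and marks ambiguous
          have hnamb : PySem.Set.contains amb (PySem.Str.strip p.2) = false := by
            rw [Bool.eq_false_iff]
            intro hcon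
            have : PySem.Str.strip p.2 ∈ amb := by
              simpa [PySem.Set.contains] using hcon
            have := (hamb _).mp this
            rw [hgd] at this
            omega
          have hrc : res.contains (PySem.Str.strip p.2) = true := by
            rw [hres, PySem.Dict.contains_mk]
            apply List.any_eq_true.mpr
            refine ⟨(PySem.Str.strip p.2, s.headD ""), ?_, by simp⟩
            unfold pvFilt
            apply List.mem_map.mpr
            refine ⟨(PySem.Str.strip p.2, s), List.mem_filter.mpr ⟨hsmem, ?_⟩, rfl⟩
            simp [PySem.Set.len, h1]
          have hsB : stepB (res, amb) p = (res.erase (PySem.Str.strip p.2),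
              PySem.Set.add amb (PySem.Str.strip p.2)) := by
            rw [stepB, if_neg hg]
            simp only [hnamb, Bool.false_eq_true, if_false, hrc, if_true]
          rw [hmA, hsB]
          apply ih _ _ _ hm' ?_ ?_ hne' hfresh' hnodup'
          · -- res.erase = filt of new items
            apply PySem.Dict.ext
            show List.filter (fun q => !q.1 == PySem.Str.strip p.2) res.items = _
            rw [show res.items = pvFilt m.items from by rw [hres]]
            rw [hitems, pvFilt_replace_drop m.items _ s (s ++ [p.1]) hsmem hkeys (by simp [h1])]
          · intro x
            rw [PySem.Dict.getD_insert]
            constructor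
            · intro hx
              rcases (PySem.Set.mem_add amb _ x).mp hx with h | h
              · have := (hamb x).mp h
                split
                · next hxe => rw [hxe, hgd] at this; simp; omega
                · exact this
              · rw [h]; simp [h1]
            · intro hx
              apply (PySem.Set.mem_add amb _ x).mpr
              split at hx
              · next hxe => exact Or.inr hxe
              · exact Or.inl ((hamb x).mpr hx)
        · -- already ambiguous: both sides leave the result unchanged
          have h2 : 2 ≤ s.length := by
            have : s.length ≠ 0 := fun h => hsne (List.length_eq_zero_iff.mp h)
            omega
          have hyamb : PySem.Set.contains amb (PySem.Str.strip p.2) = true := by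
            have : PySem.Str.strip p.2 ∈ amb := (hamb _).mpr (by rw [hgd]; exact h2)
            simpa [PySem.Set.contains] using this
          have hsB : stepB (res, amb) p = (res, amb) := by
            rw [stepB, if_neg hg]
            simp only [hyamb, if_true]
          rw [hmA, hsB]
          apply ih _ _ _ hm' ?_ ?_ hne' hfresh' hnodup'
          · rw [hres]
            congr 1
            rw [hitems,
              pvFilt_replace_keep m.items _ s (s ++ [p.1]) hsmem hkeys h1 (by simp; omega)]
          · intro x
            rw [PySem.Dict.getD_insert]
            split
            · next hxe =>
              rw [hamb x, hxe, hgd]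
              simp
              omega
            · exact hamb x
      · -- fresh name
        have hgd0 : m.getD (PySem.Str.strip p.2) ([] : PySem.Set String) = [] :=
          PySem.Dict.getD_of_not_contains m _ (by simpa using hc)
        have hmA : stepA m p = m.insert (PySem.Str.strip p.2) [p.1] := by
          rw [stepA, if_neg hg]
          simp only [hc, Bool.false_eq_true, if_false]
          rw [PySem.Dict.getD_insert_self, PySem.Dict.insert_insert_self]
          rfl
        have hnamb : PySem.Set.contains amb (PySem.Str.strip p.2) = false := by
          rw [Bool.eq_false_iff]
          intro hcon
          have : PySem.Str.strip p.2 ∈ amb := by simpa [PySem.Set.contains] using hcon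
          have := (hamb _).mp this
          rw [hgd0] at this
          simp at this
        have hrc : res.contains (PySem.Str.strip p.2) = false := by
          rw [Bool.eq_false_iff]
          intro hcon
          rw [hres, PySem.Dict.contains_mk] at hcon
          obtain ⟨q, hq, hq1⟩ := List.any_eq_true.mp hcon
          have := pvFilt_key_mem _ _ hq
          have hq1' : q.1 = PySem.Str.strip p.2 := by simpa using hq1
          rw [hq1'] at this
          exact absurd (PySem.Dict.contains_iff_mem_keys m _ |>.mpr this) (by simpa using hc)
        have hsB : stepB (res, amb) p = (res.insert (PySem.Str.strip p.2) p.1, amb) := by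
          rw [stepB, if_neg hg]
          simp only [hnamb, Bool.false_eq_true, if_false, hrc]
        rw [hmA, hsB]
        apply ih _ _ _ (PySem.Dict.nodup_keys_insert m _ _ hm) ?_ ?_ ?_ ?_ hnodup'
        · apply PySem.Dict.ext
          show (res.insert (PySem.Str.strip p.2) p.1).items =
            pvFilt (m.insert (PySem.Str.strip p.2) [p.1]).items
          rw [PySem.Dict.items_insert_of_not_contains res p.1 (by simpa using hrc),
              PySem.Dict.items_insert_of_not_contains m [p.1] (by simpa using hc),
              pvFilt_append_single]
          rw [show res.items = pvFilt m.items from by rw [hres]]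
        · intro x
          rw [PySem.Dict.getD_insert]
          split
          · next hxe =>
            simp
            intro hx
            have := (hamb x).mp hx
            rw [hxe, hgd0] at this
            simp at this
          · exact hamb x
        · intro q hq
          rcases (PySem.Dict.mem_items_insert m _ _ q).mp hq with h | ⟨h, _⟩
          · rw [h]; simp
          · exact hne q h
        · intro q hq x
          rw [PySem.Dict.getD_insert]
          split
          · simp
            intro hx
            exact hp1 (hx ▸ List.mem_map.mpr ⟨q, hq, rfl⟩)
          · exact hfresh q (List.mem_cons_of_mem _ hq) x

-- ===== VERDICT (by name: the statement is the Claim_ definition above) =====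
theorem build_reverse_map_no_duplicates_py_spec : Claim_equal_build_reverse_map_no_duplicates_py := by
  intro l _
  unfold Spec_build_reverse_map_no_duplicates_py
  unfold build_reverse_map_no_duplicates_py build_reverse_map_no_duplicates_py_alt
  have h := loop_inv (PySem.Dict.ofList l).items PySem.Dict.empty PySem.Dict.empty PySem.Set.empty
    PySem.Dict.nodup_keys_empty rfl
    (by intro x; simp [PySem.Set.empty, PySem.Dict.getD_empty])
    (by intro q hq; simp [PySem.Dict.empty] at hq)
    (by intro q hq x; simp [PySem.Dict.getD_empty])
    (PySem.Dict.nodup_keys_ofList l)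
  exact (congrArg PySem.Dict.items h).symm
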